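-- pv_equiv track=rewrite | github.com/aro-brez/weevolve | post_tool.py | _extract_error_summary
-- ===== SOURCE A (Python) =====
-- _ERROR_PATTERNS: list[str] = [
--     "error:",
--     "Error:",
--     "ERROR:",
--     "FAILED",
--     "Traceback (most recent call last)",
--     "SyntaxError:",
--     "TypeError:",
--     "ImportError:",
--     "ModuleNotFoundError:",
--     "AttributeError:",
--     "KeyError:",
--     "ValueError:",
--     "RuntimeError:",
--     "FileNotFoundError:",
--     "PermissionError:",
--     "ConnectionError:",
--     "TimeoutError:",
--     "ENOENT",
--     "EACCES",
--     "EPERM",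
--     "panic:",
--     "segmentation fault",
--     "core dumped",
-- ]
--
-- def _extract_error_summary(output: str) -> str:
--     """Extract a short error summary from tool output."""
--     if not output:
--         return "unknown error"
--     lines = output.strip().split("\n")
--     # Find the most informative error line
--     for line in reversed(lines[-20:]):
--         line_lower = line.lower().strip()
--         for pattern in _ERROR_PATTERNS:
--             if pattern.lower() in line_lower:
--                 return line.strip()[:300]
--     # Fallback: last non-empty line
--     for line in reversed(lines):
--         stripped = line.strip()
--         if stripped:
--             return stripped[:300]
--     return "unknown error"
-- ===== SOURCE B (Python) =====
-- _ERROR_PATTERNS: list[str] = [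
--     "error:",
--     "Error:",
--     "ERROR:",
--     "FAILED",
--     "Traceback (most recent call last)",
--     "SyntaxError:",
--     "TypeError:",
--     "ImportError:",
--     "ModuleNotFoundError:",
--     "AttributeError:",
--     "KeyError:",
--     "ValueError:",
--     "RuntimeError:",
--     "FileNotFoundError:",
--     "PermissionError:",
--     "ConnectionError:",
--     "TimeoutError:",
--     "ENOENT",
--     "EACCES",
--     "EPERM",
--     "panic:",
--     "segmentation fault",
--     "core dumped",
-- ]
--
-- # patterns lowered once, at import time, instead of on every line of every call
-- _ERROR_PATTERNS_LOWER = tuple(p.lower() for p in _ERROR_PATTERNS)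
--
--
-- def _extract_error_summary(output: str) -> str:
--     """Extract a short error summary from tool output (single reverse pass)."""
--     if not output:
--         return "unknown error"
--     lines = output.strip().split("\n")
--     fallback = None
--     for idx, line in enumerate(reversed(lines)):
--         if idx < 20 and any(p in line.lower().strip() for p in _ERROR_PATTERNS_LOWER):
--             return line.strip()[:300]
--         if fallback is None:
--             stripped = line.strip()
--             if stripped:
--                 fallback = stripped
--     return fallback[:300] if fallback is not None else "unknown error"
-- ===== Notes on version B (the rewrite author's own statement) =====
-- stated objective: alternative
-- what changed: The two separate reverse scans (pattern window over lines[-20:], then a full fallback scan) are fused into one indexed pass over reversed(lines) that tests patterns only while idx < 20 and captures the last non-empty line once as a fallback, with the pattern list lowercased once at import time instead of per check.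
import Mathlib
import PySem

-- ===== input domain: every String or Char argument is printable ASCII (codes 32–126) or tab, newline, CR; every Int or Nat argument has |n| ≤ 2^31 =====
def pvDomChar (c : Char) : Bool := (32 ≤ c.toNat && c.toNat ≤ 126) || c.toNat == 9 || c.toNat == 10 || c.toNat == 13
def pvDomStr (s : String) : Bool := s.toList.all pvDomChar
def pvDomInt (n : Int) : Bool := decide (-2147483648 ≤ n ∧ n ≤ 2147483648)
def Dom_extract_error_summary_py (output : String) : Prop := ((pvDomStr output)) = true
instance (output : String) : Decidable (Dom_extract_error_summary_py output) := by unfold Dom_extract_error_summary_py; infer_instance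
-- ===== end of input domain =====

-- B fuses A's two reverse scans (pattern window, then fallback scan) into one indexed pass
-- with a once-captured fallback and patterns lowercased once; alternative decomposition, same result.

-- ===== PORT A =====
-- _ERROR_PATTERNS, as in the Python module
def pvErrorPatterns : List String :=
  ["error:", "Error:", "ERROR:", "FAILED", "Traceback (most recent call last)",
   "SyntaxError:", "TypeError:", "ImportError:", "ModuleNotFoundError:",
   "AttributeError:", "KeyError:", "ValueError:", "RuntimeError:",
   "FileNotFoundError:", "PermissionError:", "ConnectionError:",
   "TimeoutError:", "ENOENT", "EACCES", "EPERM", "panic:",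
   "segmentation fault", "core dumped"]

-- inner loop: 'for pattern in _ERROR_PATTERNS: if pattern.lower() in line_lower: return …'
def pvA_patLoop : List String → String → Bool
  | [], _ => false
  | p :: rest, lineLower =>
      if PySem.Str.isIn (PySem.Str.lower p) lineLower then true else pvA_patLoop rest lineLower

-- first loop: 'for line in reversed(lines[-20:]): …'
def pvA_loop1 : List String → Option String
  | [] => none
  | line :: rest =>
      if pvA_patLoop pvErrorPatterns (PySem.Str.strip (PySem.Str.lower line)) then
        some (PySem.Str.slice (PySem.Str.strip line) none (some 300))
      else pvA_loop1 rest

-- second loop: 'for line in reversed(lines): …'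
def pvA_loop2 : List String → Option String
  | [] => none
  | line :: rest =>
      let stripped := PySem.Str.strip line
      if stripped ≠ "" then some (PySem.Str.slice stripped none (some 300))
      else pvA_loop2 rest

def extract_error_summary_py (output : String) : String :=
  if output = "" then "unknown error"
  else
    let lines := (PySem.Str.split? (PySem.Str.strip output) "\n").getD []  -- sep "\n" ≠ "": always some
    match pvA_loop1 ((PySem.List.slice lines (some (-20)) none).reverse) with
    | some r => r
    | none =>
      match pvA_loop2 lines.reverse with
      | some r => r
      | none => "unknown error"

-- ===== PORT B =====
-- _ERROR_PATTERNS_LOWER: the patterns lowercased once at import time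
def pvErrorPatternsLower : List String :=
  ["error:", "error:", "error:", "failed", "traceback (most recent call last)",
   "syntaxerror:", "typeerror:", "importerror:", "modulenotfounderror:",
   "attributeerror:", "keyerror:", "valueerror:", "runtimeerror:",
   "filenotfounderror:", "permissionerror:", "connectionerror:",
   "timeouterror:", "enoent", "eacces", "eperm", "panic:",
   "segmentation fault", "core dumped"]

-- 'any(p in line.lower().strip() for p in _ERROR_PATTERNS_LOWER)'
def pvB_match (line : String) : Bool :=
  pvErrorPatternsLower.any (fun p => PySem.Str.isIn p (PySem.Str.strip (PySem.Str.lower line)))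

-- single pass: 'for idx, line in enumerate(reversed(lines)): …' with fallback accumulator
def pvB_go : List String → Nat → Option String → String
  | [], _, fb =>
      match fb with
      | some s => PySem.Str.slice s none (some 300)
      | none => "unknown error"
  | line :: rest, idx, fb =>
      if idx < 20 && pvB_match line then
        PySem.Str.slice (PySem.Str.strip line) none (some 300)
      else
        pvB_go rest (idx + 1)
          (match fb with
           | some s => some s
           | none =>
             let stripped := PySem.Str.strip line
             if stripped ≠ "" then some stripped else none)

def extract_error_summary_py_alt (output : String) : String :=
  if output = "" then "unknown error"
  else
    pvB_go (((PySem.Str.split? (PySem.Str.strip output) "\n").getD []).reverse) 0 none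

-- ===== PRECONDITION & SPEC =====
def Spec_extract_error_summary_py (output : String) (out : String) : Prop := out = extract_error_summary_py_alt output
instance (output : String) (out : String) : Decidable (Spec_extract_error_summary_py output out) := by unfold Spec_extract_error_summary_py; infer_instance

-- ===== CLAIM (what is proved, stated in full; the proofs are below) =====
def Claim_equal_extract_error_summary_py : Prop := ∀ (output : String), Dom_extract_error_summary_py output → Spec_extract_error_summary_py output (extract_error_summary_py output)

-- ===== LEMMAS AND PROOFS =====

lemma pvA_patLoop_eq_any (l : List String) (s : String) :
    pvA_patLoop l s = l.any (fun p => PySem.Str.isIn (PySem.Str.lower p) s) := by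
  induction l with
  | nil => rfl
  | cons p rest ih =>
    cases h : PySem.Str.isIn (PySem.Str.lower p) s <;> simp [pvA_patLoop, ih]

set_option maxHeartbeats 2000000 in
lemma pvPatternsLower_eq : pvErrorPatternsLower = pvErrorPatterns.map PySem.Str.lower := rfl

lemma pvMatch_eq (line : String) :
    pvA_patLoop pvErrorPatterns (PySem.Str.strip (PySem.Str.lower line)) = pvB_match line := by
  rw [pvB_match, pvPatternsLower_eq, List.any_map, pvA_patLoop_eq_any]
  simp [Function.comp_def]

-- the merged single pass equals: pattern loop on the first (20 - i) lines, then fallback, then A's second loop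
lemma pvB_go_spec (r : List String) (i : Nat) (fb : Option String) :
    pvB_go r i fb =
      match pvA_loop1 (r.take (20 - i)) with
      | some v => v
      | none =>
        match fb with
        | some s => PySem.Str.slice s none (some 300)
        | none =>
          match pvA_loop2 r with
          | some v => v
          | none => "unknown error" := by
  induction r generalizing i fb with
  | nil => simp [pvB_go, pvA_loop1, pvA_loop2]
  | cons line rest ih =>
    by_cases hi : i < 20
    · have h20 : 20 - i = (20 - (i + 1)) + 1 := by omega
      rw [h20]
      simp only [List.take_succ_cons, pvA_loop1, pvMatch_eq]
      by_cases hm : pvB_match line = true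
      · simp [pvB_go, hi, hm]
      · simp only [pvB_go, hi, hm]
        simp only [Bool.and_false, Bool.false_eq_true, if_false, ih]
        cases fb with
        | some s => rfl
        | none =>
          simp only [pvA_loop2]
          by_cases hs : PySem.Str.strip line ≠ "" <;> simp [hs]
    · have h0 : 20 - i = 0 := by omega
      have h0' : 20 - (i + 1) = 0 := by omega
      simp only [pvB_go, h0, List.take_zero, pvA_loop1]
      have : ¬ (decide (i < 20) && pvB_match line) = true := by simp [hi]
      simp only [this, ih, h0', List.take_zero]
      cases fb with
      | some s => rfl
      | none =>
        simp only [pvA_loop2]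
        by_cases hs : PySem.Str.strip line ≠ "" <;> simp [hs, pvA_loop1]

-- reversed(lines[-20:]) is the first 20 lines of reversed(lines)
lemma pvWindow_eq (lines : List String) :
    (PySem.List.slice lines (some (-20)) none).reverse = lines.reverse.take 20 := by
  rw [PySem.List.slice_from_neg_ofNat lines 20 (by omega), List.reverse_drop]
  by_cases h : lines.length ≤ 20
  · have h1 : lines.length - (lines.length - 20) = lines.length := by omega
    rw [h1, List.take_of_length_le (by simp), List.take_of_length_le (by simpa using h)]
  · have h1 : lines.length - (lines.length - 20) = 20 := by omega
    rw [h1]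

-- ===== VERDICT (by name: the statement is the Claim_ definition above) =====
theorem extract_error_summary_py_spec : Claim_equal_extract_error_summary_py := by
  intro output _
  show extract_error_summary_py output = extract_error_summary_py_alt output
  unfold extract_error_summary_py extract_error_summary_py_alt
  by_cases h0 : output = ""
  · simp [h0]
  · simp only [h0, if_false]
    rw [pvB_go_spec, pvWindow_eq]
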